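-- pv_equiv track=rewrite | github.com/normbernardi/code_repo | Python/Strings/charCount.py | vowel_to_upper_cons_to_lower
-- ===== SOURCE A (Python) =====
-- vowels = 'aeiou'
--
-- def vowel_to_upper_cons_to_lower(string: str) -> str:
--     output_string = ""
--     for character in string:
--         if character in vowels or character in vowels.upper():
--             output_string += character.upper()
--         else:
--             output_string += character.lower()
--     return output_string
-- ===== SOURCE B (Python) =====
-- def vowel_to_upper_cons_to_lower(string: str) -> str:
--     return string.lower().translate(str.maketrans('aeiou', 'AEIOU'))
-- ===== Notes on version B (the rewrite author's own statement) =====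
-- stated objective: idiomatic
-- what changed: Replaces the explicit per-character loop with membership test and += accumulation by two whole-string library transformations: lower() the whole string, then translate() the lowercased vowels to uppercase.
import Mathlib
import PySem

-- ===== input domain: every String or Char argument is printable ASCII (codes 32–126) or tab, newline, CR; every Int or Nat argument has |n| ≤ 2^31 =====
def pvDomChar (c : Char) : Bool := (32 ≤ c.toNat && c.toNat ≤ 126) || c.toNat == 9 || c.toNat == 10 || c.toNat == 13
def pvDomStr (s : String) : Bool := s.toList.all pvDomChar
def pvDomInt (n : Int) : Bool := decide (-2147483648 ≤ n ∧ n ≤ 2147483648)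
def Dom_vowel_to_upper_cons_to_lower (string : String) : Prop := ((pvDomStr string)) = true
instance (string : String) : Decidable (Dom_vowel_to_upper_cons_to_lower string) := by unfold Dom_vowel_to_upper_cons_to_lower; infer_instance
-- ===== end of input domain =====

-- B replaces A's per-character loop (membership test + += accumulation) by two
-- whole-string transformations: lower() the whole string, then translate the
-- lowercased vowels to uppercase.

-- ===== PORT A =====
-- vowels = 'aeiou'
def pvVowels : List Char := "aeiou".toList

def vowel_to_upper_cons_to_lower (string : String) : String :=
  String.mk <|
    string.toList.foldl
      (fun output_string character =>
        if pvVowels.contains character || (PySem.Chars.upper pvVowels).contains character then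
          output_string ++ [PySem.Chars.upperChar character]
        else
          output_string ++ [PySem.Chars.lowerChar character])
      []

-- ===== PORT B =====
-- str.maketrans('aeiou', 'AEIOU')
def pvTransTable : PySem.Dict Char Char :=
  PySem.Dict.ofList (List.zip "aeiou".toList "AEIOU".toList)

def vowel_to_upper_cons_to_lower_alt (string : String) : String :=
  String.mk <|
    (PySem.Str.lower string).toList.map (fun c => (pvTransTable.get? c).getD c)

-- ===== PRECONDITION & SPEC =====
def Spec_vowel_to_upper_cons_to_lower (string : String) (out : String) : Prop := out = vowel_to_upper_cons_to_lower_alt string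
instance (string : String) (out : String) : Decidable (Spec_vowel_to_upper_cons_to_lower string out) := by unfold Spec_vowel_to_upper_cons_to_lower; infer_instance

-- ===== CLAIM (what is proved, stated in full; the proofs are below) =====
def Claim_equal_vowel_to_upper_cons_to_lower : Prop := ∀ (string : String), Dom_vowel_to_upper_cons_to_lower string → Spec_vowel_to_upper_cons_to_lower string (vowel_to_upper_cons_to_lower string)

-- ===== LEMMAS AND PROOFS =====

-- A's loop body as a per-character function
def pvStepA (c : Char) : Char :=
  if pvVowels.contains c || (PySem.Chars.upper pvVowels).contains c then
    PySem.Chars.upperChar c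
  else
    PySem.Chars.lowerChar c

theorem pv_foldl_eq_map (l acc : List Char) :
    l.foldl
      (fun output_string character =>
        if pvVowels.contains character || (PySem.Chars.upper pvVowels).contains character then
          output_string ++ [PySem.Chars.upperChar character]
        else
          output_string ++ [PySem.Chars.lowerChar character])
      acc = acc ++ l.map pvStepA := by
  induction l generalizing acc with
  | nil => simp
  | cons c t ih =>
    simp only [List.foldl_cons, List.map_cons, ih, pvStepA]
    split <;> simp

theorem pv_ptwise (n : Nat) (hn : n < 128) :
    pvStepA (Char.ofNat n)
      = (pvTransTable.get? (PySem.Chars.lowerChar (Char.ofNat n))).getD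
          (PySem.Chars.lowerChar (Char.ofNat n)) := by
  revert hn
  revert n
  decide

theorem pv_ptwise_dom (c : Char) (hc : pvDomChar c = true) :
    pvStepA c
      = (pvTransTable.get? (PySem.Chars.lowerChar c)).getD (PySem.Chars.lowerChar c) := by
  have hlt : c.toNat < 128 := by
    simp [pvDomChar] at hc
    omega
  have hofn : Char.ofNat c.toNat = c := Char.ofNat_toNat c
  have := pv_ptwise c.toNat hlt
  rwa [hofn] at this

-- ===== VERDICT (by name: the statement is the Claim_ definition above) =====
theorem vowel_to_upper_cons_to_lower_spec : Claim_equal_vowel_to_upper_cons_to_lower := by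
  intro s hdom
  unfold Spec_vowel_to_upper_cons_to_lower vowel_to_upper_cons_to_lower vowel_to_upper_cons_to_lower_alt
  rw [pv_foldl_eq_map]
  have hlower : (PySem.Str.lower s).toList = s.toList.map PySem.Chars.lowerChar := by
    simp [PySem.Str.toList_lower, PySem.Chars.lower]
  rw [hlower, List.nil_append, List.map_map]
  congr 1
  apply List.map_congr_left
  intro c hc
  have hdc : pvDomChar c = true := by
    have := (List.all_eq_true.mp hdom) c hc
    exact this
  exact pv_ptwise_dom c hdc
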